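-- pv_equiv track=rewrite | github.com/spiman9/Practice-for-the-best-c-plus-plus-python-codes | Accenture/13.py | maxExponent
-- ===== SOURCE A (Python) =====
-- def maxExponent(a , b):
--     mx = -1
--     ans = -1
--     for i in  range(a , b+1):
--         t = i
--         ct = 0
--         while(i>0):
--             ct+=1
--             i//=2
--         if ct > mx:
--             mx = ct
--             ans = t
--     return ans
-- ===== SOURCE B (Python) =====
-- def maxExponent(a, b):
--     if a > b:
--         return -1
--     if b <= 0:
--         return a
--     return max(a, 1 << (b.bit_length() - 1))
-- ===== Notes on version B (the rewrite author's own statement) =====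
-- stated objective: faster
-- what changed: Replaced the O((b-a)·log b) scan that recomputes each number's bit count with an O(1) closed form: the first number in [a,b] with maximal bit length is max(a, 2^(b.bit_length()-1)) (with -1 for an empty range and a when b <= 0).
import Mathlib
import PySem

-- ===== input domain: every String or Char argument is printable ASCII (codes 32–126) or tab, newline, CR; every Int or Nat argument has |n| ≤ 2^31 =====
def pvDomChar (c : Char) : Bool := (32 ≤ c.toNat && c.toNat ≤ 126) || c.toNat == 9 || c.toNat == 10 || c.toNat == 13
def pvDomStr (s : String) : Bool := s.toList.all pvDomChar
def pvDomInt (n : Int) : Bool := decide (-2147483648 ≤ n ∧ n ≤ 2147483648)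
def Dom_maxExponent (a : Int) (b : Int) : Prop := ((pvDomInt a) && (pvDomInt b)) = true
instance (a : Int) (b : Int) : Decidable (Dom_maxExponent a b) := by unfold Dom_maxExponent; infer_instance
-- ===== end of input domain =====

-- B replaces A's linear scan over [a, b] (with an inner halving loop per element) by a
-- closed form using b.bit_length(); same return value, asymptotically faster.

-- ===== PORT A =====
-- the inner 'while i > 0: ct += 1; i //= 2' loop of A, counting the halvings of i
def pvBC (i : Int) : Int :=
  if h : 0 < i then 1 + pvBC (PySem.Int.floordiv i 2) else 0
termination_by i.toNat
decreasing_by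
  rw [PySem.Int.floordiv_eq_ediv_of_pos (by norm_num : (0:Int) < 2)]
  omega

-- one iteration of A's for loop: state is (mx, ans)
def pvStep (s : Int × Int) (i : Int) : Int × Int :=
  let t := i
  let ct := pvBC i
  if ct > s.1 then (ct, t) else s

def maxExponent (a : Int) (b : Int) : Int :=
  ((PySem.List.pyRange a (b + 1) 1).foldl pvStep (-1, -1)).2

-- ===== PORT B =====
def maxExponent_alt (a : Int) (b : Int) : Int :=
  if a > b then -1
  else if b ≤ 0 then a
  else max a ((2 : Int) ^ (PySem.Int.bitLength b - 1))

-- ===== PRECONDITION & SPEC =====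
def Spec_maxExponent (a : Int) (b : Int) (out : Int) : Prop := out = maxExponent_alt a b
instance (a : Int) (b : Int) (out : Int) : Decidable (Spec_maxExponent a b out) := by unfold Spec_maxExponent; infer_instance

-- ===== CLAIM (what is proved, stated in full; the proofs are below) =====
def Claim_equal_maxExponent : Prop := ∀ (a : Int) (b : Int), Dom_maxExponent a b → Spec_maxExponent a b (maxExponent a b)

-- ===== LEMMAS AND PROOFS =====

theorem pvBC_nonpos {i : Int} (h : ¬ 0 < i) : pvBC i = 0 := by
  rw [pvBC, dif_neg h]

theorem pvBC_pos_eq_bitLength : ∀ (n : Nat) (i : Int), i.toNat ≤ n → 0 < i →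
    pvBC i = (PySem.Int.bitLength i : Int) := by
  intro n
  induction n with
  | zero => intro i h hi; omega
  | succ n ih =>
    intro i h hi
    rw [pvBC, dif_pos hi, PySem.Int.bitLength_of_pos hi]
    have hj : PySem.Int.floordiv i 2 = i / 2 :=
      PySem.Int.floordiv_eq_ediv_of_pos (by norm_num)
    by_cases h0 : 0 < PySem.Int.floordiv i 2
    · rw [ih _ (by rw [hj]; omega) h0]; push_cast; ring
    · have hz : PySem.Int.floordiv i 2 = 0 := by rw [hj]; rw [hj] at h0; omega
      rw [hz, pvBC, dif_neg (by norm_num : ¬ (0:Int) < 0), PySem.Int.bitLength_zero]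
      norm_num

theorem pvBC_pos {i : Int} (hi : 0 < i) : pvBC i = (PySem.Int.bitLength i : Int) :=
  pvBC_pos_eq_bitLength i.toNat i le_rfl hi

theorem pvBC_nonneg (i : Int) : 0 ≤ pvBC i := by
  by_cases h : 0 < i
  · rw [pvBC_pos h]; positivity
  · rw [pvBC_nonpos h]

theorem bitLength_pos {i : Int} (hi : 0 < i) : 1 ≤ PySem.Int.bitLength i := by
  rw [PySem.Int.bitLength_of_pos hi]; omega

-- for b > 0, 2^(bitLength b - 1) ≤ b  (as integers)
theorem two_pow_pred_le {b : Int} (hb : 0 < b) :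
    (2 : Int) ^ (PySem.Int.bitLength b - 1) ≤ b := by
  have h := PySem.Int.two_pow_bitLength_le b (by omega)
  have h2 : (((2 : Nat) ^ (PySem.Int.bitLength b - 1) : Nat) : Int) ≤ (b.natAbs : Int) := by
    exact_mod_cast h
  rw [Int.natAbs_of_nonneg (le_of_lt hb)] at h2
  push_cast at h2
  exact h2

-- for b ≥ 0, b < 2^(bitLength b)
theorem lt_two_pow {b : Int} (hb : 0 ≤ b) :
    b < (2 : Int) ^ (PySem.Int.bitLength b) := by
  have h := PySem.Int.lt_two_pow_bitLength b
  have h2 : (b.natAbs : Int) < (((2 : Nat) ^ PySem.Int.bitLength b : Nat) : Int) := by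
    exact_mod_cast h
  rw [Int.natAbs_of_nonneg hb] at h2
  push_cast at h2
  exact h2

theorem alt_nonpos {a b : Int} (h : a ≤ b) (h0 : b ≤ 0) : maxExponent_alt a b = a := by
  unfold maxExponent_alt
  rw [if_neg (by omega), if_pos h0]

theorem alt_pos {a b : Int} (h : a ≤ b) (h0 : 0 < b) :
    maxExponent_alt a b = max a ((2 : Int) ^ (PySem.Int.bitLength b - 1)) := by
  unfold maxExponent_alt
  rw [if_neg (by omega), if_neg (by omega)]

-- the loop invariant: for a ≤ b the fold ends at (bit count of b, closed-form answer)
theorem loop_inv : ∀ (n : Nat) (a b : Int), a ≤ b → (b - a).toNat = n →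
    (PySem.List.pyRange a (b + 1) 1).foldl pvStep (-1, -1) =
      (pvBC b, maxExponent_alt a b) := by
  intro n
  induction n with
  | zero =>
    intro a b hab hn
    have hab' : a = b := by omega
    subst hab'
    rw [PySem.List.pyRange_one_singleton]
    simp only [List.foldl, pvStep]
    rw [if_pos (by have := pvBC_nonneg a; omega)]
    by_cases h0 : a ≤ 0
    · rw [alt_nonpos le_rfl h0]
    · rw [alt_pos le_rfl (by omega),
        max_eq_left (two_pow_pred_le (show (0:Int) < a by omega))]
  | succ n ih =>
    intro a b hab hn
    have hab' : a ≤ b - 1 := by omega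
    rw [PySem.List.pyRange_one_succ_right hab, List.foldl_append]
    have hb1 : b - 1 + 1 = b := by ring
    have ihr := ih a (b - 1) hab' (by omega)
    rw [hb1] at ihr
    rw [ihr]
    simp only [List.foldl, pvStep]
    by_cases hbpos : 0 < b
    · by_cases hb1pos : 0 < b - 1
      · -- b ≥ 2
        rw [pvBC_pos hbpos, pvBC_pos hb1pos]
        set k := PySem.Int.bitLength (b - 1) with hk
        set m := PySem.Int.bitLength b with hm
        have hkpos : 1 ≤ k := bitLength_pos hb1pos
        have hmk : k ≤ m := by
          by_contra hcon
          have h1 : (2:Int) ^ (k - 1) ≤ b - 1 := by rw [hk]; exact two_pow_pred_le hb1pos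
          have h2 : b < (2:Int) ^ m := by rw [hm]; exact lt_two_pow (by omega)
          have h3 : (2:Int) ^ m ≤ (2:Int) ^ (k - 1) := by
            apply pow_le_pow_right₀ (by norm_num); omega
          omega
        have hmk1 : m ≤ k + 1 := by
          by_contra hcon
          have h1 : (2:Int) ^ (m - 1) ≤ b := by rw [hm]; exact two_pow_pred_le hbpos
          have h2 : b - 1 < (2:Int) ^ k := by rw [hk]; exact lt_two_pow (by omega)
          have h3 : (2:Int) ^ (k + 1) ≤ (2:Int) ^ (m - 1) := by
            apply pow_le_pow_right₀ (by norm_num); omega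
          have h4 : (2:Int) ^ k < (2:Int) ^ (k + 1) := by
            apply pow_lt_pow_right₀ (by norm_num); omega
          omega
        by_cases heq : m = k
        · -- the bit length did not change: no update, answers coincide
          rw [if_neg (by exact_mod_cast (by omega : ¬ ((k:Int) < (m:Int))))]
          rw [alt_pos hab' hb1pos, alt_pos hab hbpos, ← hk, ← hm, heq]
        · have hm1 : m = k + 1 := by omega
          have hupd : (2:Int) ^ k = b := by
            have h1 : (2:Int) ^ (m - 1) ≤ b := by rw [hm]; exact two_pow_pred_le hbpos
            have h2 : b - 1 < (2:Int) ^ k := by rw [hk]; exact lt_two_pow (by omega)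
            rw [hm1] at h1
            simp only [Nat.add_sub_cancel] at h1
            omega
          rw [if_pos (by exact_mod_cast (by omega : (k:Int) < (m:Int)))]
          rw [alt_pos hab hbpos, ← hm, hm1]
          simp only [Nat.add_sub_cancel]
          rw [hupd, max_eq_right (by omega)]
      · -- b = 1: previous state is (0, a) with a ≤ 0; A updates to (1, 1)
        have hb1' : b = 1 := by omega
        subst hb1'
        have hz : pvBC (1 - 1) = 0 := by norm_num [pvBC_nonpos]
        have ho : pvBC 1 = 1 := by
          rw [pvBC, dif_pos (by norm_num), PySem.Int.floordiv_eq_ediv_of_pos (by norm_num)]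
          norm_num [pvBC_nonpos]
        rw [hz, ho, if_pos (by norm_num)]
        have hbl1 : PySem.Int.bitLength 1 = 1 := by decide
        rw [alt_pos hab (by norm_num), hbl1]
        norm_num
        omega
    · -- b ≤ 0: ct = 0 = mx, no update, the answer stays a
      rw [pvBC_nonpos hbpos, pvBC_nonpos (by omega : ¬ 0 < b - 1)]
      rw [if_neg (by omega)]
      rw [alt_nonpos hab' (by omega), alt_nonpos hab (by omega)]

-- ===== VERDICT (by name: the statement is the Claim_ definition above) =====
theorem maxExponent_spec : Claim_equal_maxExponent := by
  intro a b _
  unfold Spec_maxExponent maxExponent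
  by_cases hab : a ≤ b
  · rw [loop_inv (b - a).toNat a b hab rfl]
  · rw [PySem.List.pyRange_one_eq_nil (by omega)]
    simp only [List.foldl]
    unfold maxExponent_alt
    rw [if_pos (by omega)]
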